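-- pv_equiv track=rewrite | github.com/sahaj-mamgain/Differentiation | calc.py | process_variables
-- ===== SOURCE A (Python) =====
-- def process_variables(input_string):
-- 	'''
-- 	Recursive function to take input string and remove functional text to count actual variables
-- 	'''
-- 	string = ''
-- 	processed = input_string.split('+')
-- 	for process in processed:
-- 		if '(' in process:
-- 			string += process_variables(process[process.find('(') + 1: process.find(')', process.find('(') + 1)])
-- 		else:
-- 			string += process
-- 	return string
-- ===== SOURCE B (Python) =====
-- def process_variables(input_string):
-- 	'''
-- 	Iterative worklist version: an explicit stack of pending tokens replaces recursion.
-- 	'''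
-- 	result = ''
-- 	stack = list(reversed(input_string.split('+')))
-- 	while stack:
-- 		token = stack.pop()
-- 		if '(' in token:
-- 			i = token.find('(')
-- 			inner = token[i + 1: token.find(')', i + 1)]
-- 			stack.extend(reversed(inner.split('+')))
-- 		else:
-- 			result += token
-- 	return result
-- ===== Notes on version B (the rewrite author's own statement) =====
-- stated objective: alternative
-- what changed: Replaces A's recursion (each parenthesised token spawns a recursive call on its inner slice) by an iterative explicit worklist: tokens are popped from a stack, a parenthesised token pushes the split parts of its inner slice back onto the stack, plain tokens are appended to the accumulator.
import Mathlib
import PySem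

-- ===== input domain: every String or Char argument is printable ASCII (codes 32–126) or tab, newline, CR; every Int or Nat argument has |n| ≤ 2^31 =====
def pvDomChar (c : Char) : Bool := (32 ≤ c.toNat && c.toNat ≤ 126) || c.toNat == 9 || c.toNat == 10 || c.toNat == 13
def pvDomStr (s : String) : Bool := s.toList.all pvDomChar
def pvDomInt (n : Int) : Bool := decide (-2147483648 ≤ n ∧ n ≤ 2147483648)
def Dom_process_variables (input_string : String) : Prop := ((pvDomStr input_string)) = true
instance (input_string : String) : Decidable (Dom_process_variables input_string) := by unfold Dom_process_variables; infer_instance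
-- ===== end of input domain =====

-- B replaces A's recursion by an iterative explicit worklist (stack of pending tokens); return values proved equal.

-- shared helper: the inner slice process[process.find('(')+1 : process.find(')', process.find('(')+1)]
def pvInner (t : List Char) : List Char :=
  PySem.List.slice t (some (PySem.Chars.find t ['('] + 1))
    (some (PySem.Chars.findFrom t [')'] (PySem.Chars.find t ['('] + 1)))

-- structural characterisation of split('+'), used by the termination arguments of both ports
def pvSplit (pre : List Char) : List Char → List (List Char)
  | [] => [pre]
  | c :: rest => if c = '+' then pre :: pvSplit [] rest else pvSplit (pre ++ [c]) rest

theorem pvSplitOn_go_eq (fuel : Nat) (l cur : List Char) (acc : List (List Char))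
    (h : l.length < fuel) :
    PySem.Chars.splitOn.go ['+'] fuel l cur acc = acc.reverse ++ pvSplit cur.reverse l := by
  induction fuel generalizing l cur acc with
  | zero => omega
  | succ fuel ih =>
    cases l with
    | nil => simp [PySem.Chars.splitOn.go, pvSplit]
    | cons c rest =>
      by_cases hc : c = '+'
      · subst hc
        rw [PySem.Chars.splitOn.go]
        simp only [List.isPrefixOf, BEq.rfl, Bool.true_and, if_pos]
        rw [ih _ _ _ (by simpa using Nat.lt_of_succ_lt_succ h)]
        simp [pvSplit]
      · rw [PySem.Chars.splitOn.go]
        have hpf : List.isPrefixOf ['+'] (c :: rest) = false := by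
          simp [List.isPrefixOf]
          intro hcc; exact absurd hcc.symm hc
        rw [hpf]
        simp only [Bool.false_eq_true, if_false]
        rw [ih _ _ _ (by simpa using Nat.lt_of_succ_lt_succ h)]
        simp [pvSplit, hc]
  
theorem pvSplitOn_eq (s : List Char) :
    PySem.Chars.splitOn s ['+'] = pvSplit [] s := by
  rw [PySem.Chars.splitOn, pvSplitOn_go_eq s.length.succ s [] [] (by omega)]
  simp

theorem pvSplit_mem_length {p : List Char} : ∀ (pre l : List Char),
    p ∈ pvSplit pre l → p.length ≤ pre.length + l.length := by
  intro pre l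
  induction l generalizing pre with
  | nil => intro h; simp [pvSplit] at h; simp [h]
  | cons c rest ih =>
    intro h
    simp only [pvSplit] at h
    split at h
    · rcases List.mem_cons.mp h with h | h
      · simp [h]
      · have := ih [] h; simp at this; simp; omega
    · have := ih (pre ++ [c]) h; simp at this ⊢; omega

theorem pvSplit_sum (pre l : List Char) :
    ((pvSplit pre l).map (fun t => t.length + 1)).sum = pre.length + l.length + 1 := by
  induction l generalizing pre with
  | nil => simp [pvSplit]
  | cons c rest ih =>
    simp only [pvSplit]
    split
    · simp [ih]; omega
    · rw [ih]; simp; omega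

theorem pvInner_lt_length {t : List Char} (h : PySem.Chars.isIn ['('] t = true) :
    (pvInner t).length < t.length := by
  have hfind : PySem.Chars.find t ['('] ≠ -1 := by
    simpa [PySem.Chars.isIn] using h
  have hge : 0 ≤ PySem.Chars.find t ['('] := by
    have := PySem.Chars.neg_one_le_find t ['(']
    omega
  obtain ⟨hpre, -⟩ := PySem.Chars.find_spec hge
  have hlt : (PySem.Chars.find t ['(']).toNat < t.length := by
    by_contra hnot
    rw [List.drop_eq_nil_of_le (by omega)] at hpre
    simp at hpre
  unfold pvInner
  rw [PySem.List.length_slice]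
  have h1 : PySem.List.clampIdx t.length (PySem.Chars.find t ['('] + 1)
      = (PySem.Chars.find t ['('] + 1).toNat := by
    apply PySem.List.clampIdx_of_nonneg_of_le (by omega)
    omega
  have h2 := PySem.List.clampIdx_le t.length
    (PySem.Chars.findFrom t [')'] (PySem.Chars.find t ['('] + 1))
  omega

-- ===== PORT A =====
def process_variables_aux (s : List Char) : List Char :=
  (PySem.Chars.splitOn s ['+']).attach.foldl
    (fun acc p =>
      if h : PySem.Chars.isIn ['('] p.1 = true then
        acc ++ process_variables_aux (pvInner p.1)
      else
        acc ++ p.1) []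
termination_by s.length
decreasing_by
  have hmem : p.1.length ≤ s.length := by
    have := pvSplit_mem_length [] s (by rw [← pvSplitOn_eq]; exact p.2)
    simpa using this
  have := pvInner_lt_length h
  omega

def process_variables (input_string : String) : String :=
  String.ofList (process_variables_aux input_string.toList)

-- ===== PORT B =====
def pvBloop (res : List Char) (stack : List (List Char)) : List Char :=
  match stack with
  | [] => res
  | t :: rest =>
    if h : PySem.Chars.isIn ['('] t = true then
      pvBloop res (PySem.Chars.splitOn (pvInner t) ['+'] ++ rest)
    else
      pvBloop (res ++ t) rest
termination_by (stack.map (fun u => u.length + 1)).sum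
decreasing_by
  all_goals simp only [List.map_append, List.sum_append, List.map_cons, List.sum_cons]
  · have hsum : ((PySem.Chars.splitOn (pvInner t) ['+']).map (fun u => u.length + 1)).sum
        = (pvInner t).length + 1 := by
      rw [pvSplitOn_eq, pvSplit_sum]; simp
    have := pvInner_lt_length h
    omega
  · omega

def process_variables_alt (input_string : String) : String :=
  String.ofList (pvBloop [] (PySem.Chars.splitOn input_string.toList ['+']))

-- ===== PRECONDITION & SPEC =====
def Spec_process_variables (input_string : String) (out : String) : Prop := out = process_variables_alt input_string
instance (input_string : String) (out : String) : Decidable (Spec_process_variables input_string out) := by unfold Spec_process_variables; infer_instance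

-- ===== CLAIM (what is proved, stated in full; the proofs are below) =====
def Claim_equal_process_variables : Prop := ∀ (input_string : String), Dom_process_variables input_string → Spec_process_variables input_string (process_variables input_string)

-- ===== LEMMAS AND PROOFS =====
-- the value A contributes for one token
def pvTok (p : List Char) : List Char :=
  if PySem.Chars.isIn ['('] p then process_variables_aux (pvInner p) else p

theorem pvA_eq_flatten (s : List Char) :
    process_variables_aux s = ((PySem.Chars.splitOn s ['+']).map pvTok).flatten := by
  rw [process_variables_aux]
  have hcongr :
      (PySem.Chars.splitOn s ['+']).attach.foldl
        (fun acc p =>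
          if h : PySem.Chars.isIn ['('] p.1 = true then
            acc ++ process_variables_aux (pvInner p.1)
          else acc ++ p.1) []
      = (PySem.Chars.splitOn s ['+']).attach.foldl
          (fun acc p => acc ++ pvTok p.1) [] := by
    apply PySem.List.foldl_congr_mem
    intro acc p _
    unfold pvTok
    split <;> simp_all
  rw [hcongr, List.foldl_attach (f := fun acc x => acc ++ pvTok x), PySem.List.foldl_append_eq_flatMap]
  simp [List.flatMap_def]

theorem pvBloop_eq (res : List Char) (stack : List (List Char)) :
    pvBloop res stack = res ++ (stack.map pvTok).flatten := by
  induction res, stack using pvBloop.induct with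
  | case1 res => simp [pvBloop]
  | case2 res t rest h ih =>
    rw [pvBloop]
    simp only [h, dite_true]
    rw [ih]
    simp [pvTok, h, pvA_eq_flatten (pvInner t)]
  | case3 res t rest h ih =>
    rw [pvBloop]
    simp only [h]
    rw [ih]
    simp [pvTok, h]

-- ===== VERDICT (by name: the statement is the Claim_ definition above) =====
theorem process_variables_spec : Claim_equal_process_variables := by
  intro s _
  unfold Spec_process_variables process_variables process_variables_alt
  rw [pvBloop_eq, pvA_eq_flatten]
  simp
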